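-- pv_equiv track=rewrite | github.com/Owl1y/aoc | aoc15/day3.py | cords_fun
-- ===== SOURCE A (Python) =====
-- def cords_fun(directions):
--     count_x = 0
--     count_y = 0
--     coords_of_houses = [[0,0]]
--     for i in directions:
--         if i == '>':
--             count_x = count_x + 1
--             coords_of_houses.append([count_x, count_y])
--         if i == '<':
--             count_x = count_x - 1
--             coords_of_houses.append([count_x, count_y])
--         if i == '^':
--             count_y = count_y + 1
--             coords_of_houses.append([count_x, count_y])
--         if i == 'v':
--             count_y = count_y - 1
--             coords_of_houses.append([count_x, count_y])
--
--     return coords_of_houses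
-- ===== SOURCE B (Python) =====
-- DELTAS = {'>': (1, 0), '<': (-1, 0), '^': (0, 1), 'v': (0, -1)}
--
-- def cords_fun(directions):
--     moves = [DELTAS[c] for c in directions if c in DELTAS]
--     return _scan(0, 0, moves)
--
-- def _scan(x, y, moves):
--     if not moves:
--         return [[x, y]]
--     (dx, dy), rest = moves[0], moves[1:]
--     return [[x, y]] + _scan(x + dx, y + dy, rest)
-- ===== Notes on version B (the rewrite author's own statement) =====
-- stated objective: alternative
-- what changed: Replaces the four-branch counter loop with a delta-table lookup that filters/maps the moves first, then a recursive prefix-sum scan that emits each coordinate before recursing.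
import Mathlib
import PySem

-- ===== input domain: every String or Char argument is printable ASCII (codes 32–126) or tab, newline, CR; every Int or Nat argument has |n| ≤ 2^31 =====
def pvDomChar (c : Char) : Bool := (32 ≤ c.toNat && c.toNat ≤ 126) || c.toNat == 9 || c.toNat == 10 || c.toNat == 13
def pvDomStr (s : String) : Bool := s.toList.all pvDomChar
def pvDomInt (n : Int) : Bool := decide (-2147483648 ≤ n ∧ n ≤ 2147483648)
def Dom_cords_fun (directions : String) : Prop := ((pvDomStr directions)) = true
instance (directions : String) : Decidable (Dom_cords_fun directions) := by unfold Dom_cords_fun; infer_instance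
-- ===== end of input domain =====

-- B replaces A's four-branch counter loop by a delta-table lookup (filter/map the moves) followed by a recursive prefix-sum scan: an alternative decomposition, same cost.

-- ===== PORT A =====
-- state: (count_x, count_y, coords_of_houses); four sequential ifs exactly as in A
def cordsStepA (st : Int × Int × List (List Int)) (i : Char) : Int × Int × List (List Int) :=
  let st := if i = '>' then (st.1 + 1, st.2.1, st.2.2 ++ [[st.1 + 1, st.2.1]]) else st
  let st := if i = '<' then (st.1 - 1, st.2.1, st.2.2 ++ [[st.1 - 1, st.2.1]]) else st
  let st := if i = '^' then (st.1, st.2.1 + 1, st.2.2 ++ [[st.1, st.2.1 + 1]]) else st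
  let st := if i = 'v' then (st.1, st.2.1 - 1, st.2.2 ++ [[st.1, st.2.1 - 1]]) else st
  st

def cords_fun (directions : String) : List (List Int) :=
  (directions.toList.foldl cordsStepA (0, 0, [[0, 0]])).2.2

-- ===== PORT B =====
def DELTAS : PySem.Dict Char (Int × Int) :=
  PySem.Dict.ofList [('>', (1, 0)), ('<', (-1, 0)), ('^', (0, 1)), ('v', (0, -1))]

-- _scan: emit [x,y] then recurse on the rest of the moves
def cordsScan (x y : Int) : List (Int × Int) → List (List Int)
  | [] => [[x, y]]
  | (dx, dy) :: rest => [x, y] :: cordsScan (x + dx) (y + dy) rest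

-- [DELTAS[c] for c in directions if c in DELTAS] then _scan(0, 0, moves)
def cords_fun_alt (directions : String) : List (List Int) :=
  cordsScan 0 0 (directions.toList.filterMap (fun c => DELTAS.get? c))

-- ===== PRECONDITION & SPEC =====
def Spec_cords_fun (directions : String) (out : List (List Int)) : Prop := out = cords_fun_alt directions
instance (directions : String) (out : List (List Int)) : Decidable (Spec_cords_fun directions out) := by unfold Spec_cords_fun; infer_instance

-- ===== CLAIM (what is proved, stated in full; the proofs are below) =====
def Claim_equal_cords_fun : Prop := ∀ (directions : String), Dom_cords_fun directions → Spec_cords_fun directions (cords_fun directions)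

-- ===== LEMMAS AND PROOFS =====

lemma deltas_gt : DELTAS.get? '>' = some (1, 0) := by decide
lemma deltas_lt : DELTAS.get? '<' = some (-1, 0) := by decide
lemma deltas_up : DELTAS.get? '^' = some (0, 1) := by decide
lemma deltas_dn : DELTAS.get? 'v' = some (0, -1) := by decide

lemma deltas_items : DELTAS.items = [('>', (1, 0)), ('<', (-1, 0)), ('^', (0, 1)), ('v', (0, -1))] := by decide

lemma cords_invariant (l : List Char) (x y : Int) (acc : List (List Int)) :
    (l.foldl cordsStepA (x, y, acc ++ [[x, y]])).2.2
      = acc ++ cordsScan x y (l.filterMap (fun c => DELTAS.get? c)) := by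
  induction l generalizing x y acc with
  | nil => simp [cordsScan]
  | cons c l ih =>
    by_cases h1 : c = '>'
    · subst h1
      simpa [cordsStepA, List.filterMap_cons, deltas_gt, cordsScan,
        List.append_assoc] using ih (x + 1) y (acc ++ [[x, y]])
    · by_cases h2 : c = '<'
      · subst h2
        simpa [cordsStepA, List.filterMap_cons, deltas_lt, cordsScan,
          List.append_assoc] using ih (x - 1) y (acc ++ [[x, y]])
      · by_cases h3 : c = '^'
        · subst h3
          simpa [cordsStepA, List.filterMap_cons, deltas_up, cordsScan,
            List.append_assoc] using ih x (y + 1) (acc ++ [[x, y]])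
        · by_cases h4 : c = 'v'
          · subst h4
            simpa [cordsStepA, List.filterMap_cons, deltas_dn, cordsScan,
              List.append_assoc] using ih x (y - 1) (acc ++ [[x, y]])
          · have e1 : ('>' == c) = false := by simp [Ne.symm h1]
            have e2 : ('<' == c) = false := by simp [Ne.symm h2]
            have e3 : ('^' == c) = false := by simp [Ne.symm h3]
            have e4 : ('v' == c) = false := by simp [Ne.symm h4]
            have hnone : DELTAS.get? c = none := by
              simp [PySem.Dict.get?, deltas_items, List.find?, e1, e2, e3, e4]
            simpa [cordsStepA, h1, h2, h3, h4, List.filterMap_cons, hnone] using ih x y acc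

-- ===== VERDICT (by name: the statement is the Claim_ definition above) =====
theorem cords_fun_spec : Claim_equal_cords_fun := by
  intro directions _
  unfold Spec_cords_fun cords_fun cords_fun_alt
  simpa using cords_invariant directions.toList 0 0 []
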